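-- pv_equiv track=rewrite | github.com/mengchheanglong/directive-workspace | forge/source-packs/desloppify/desloppify/languages/typescript/detectors/smells/helpers.py | _scan_code_line
-- ===== SOURCE A (Python) =====
-- def _scan_template_content(
--     line: str, start: int, brace_depth: int = 0
-- ) -> tuple[int, bool, int]:
--     """Scan template literal content from *start* in *line*."""
--     j = start
--     while j < len(line):
--         ch = line[j]
--         if ch == "\\" and j + 1 < len(line):
--             j += 2
--             continue
--         if ch == "$" and j + 1 < len(line) and line[j + 1] == "{":
--             brace_depth += 1
--             j += 2
--             continue
--         if ch == "}" and brace_depth > 0: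
--             brace_depth -= 1
--             j += 1
--             continue
--         if ch == "`" and brace_depth == 0:
--             return (j + 1, True, brace_depth)
--         j += 1
--     return (j, False, brace_depth)
--
-- def _scan_code_line(line: str) -> tuple[bool, bool, int]:
--     """Scan a normal code line for block comment or template literal start."""
--     j = 0
--     in_str = None
--     while j < len(line):
--         ch = line[j]
--
--         if in_str and ch == "\\" and j + 1 < len(line):
--             j += 2
--             continue
--
--         if in_str:
--             if ch == in_str:
--                 in_str = None
--             j += 1
--             continue
--
--         if ch == "/" and j + 1 < len(line) and line[j + 1] == "/":
--             break
--
--         if ch == "/" and j + 1 < len(line) and line[j + 1] == "*":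
--             close = line.find("*/", j + 2)
--             if close != -1:
--                 j = close + 2
--                 continue
--             return (True, False, 0)
--
--         if ch == "`":
--             end_pos, found_close, depth = _scan_template_content(line, j + 1)
--             if found_close:
--                 j = end_pos
--                 continue
--             return (False, True, depth)
--
--         if ch in ("'", '"'):
--             in_str = ch
--             j += 1
--             continue
--
--         j += 1
--
--     return (False, False, 0)
-- ===== SOURCE B (Python) =====
-- def _nearest(line, i, pats):
--     """Position and pattern of the earliest occurrence of any pattern at or after i."""
--     best = None
--     best_pat = None
--     for pat in pats:
--         p = line.find(pat, i)
--         if p != -1 and (best is None or p < best):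
--             best, best_pat = p, pat
--     return best, best_pat
--
--
-- def _scan_code_line(line: str) -> tuple[bool, bool, int]:
--     """Jump between delimiters with str.find instead of stepping over every character."""
--     n = len(line)
--     i = 0
--     while True:
--         p, pat = _nearest(line, i, ("//", "/*", "`", "'", '"'))
--         if p is None or pat == "//":
--             return (False, False, 0)
--         if pat == "/*":
--             close = line.find("*/", p + 2)
--             if close == -1:
--                 return (True, False, 0)
--             i = close + 2
--             continue
--         if pat == "`":
--             i = p + 1
--             depth = 0
--             while True:
--                 q, tp = _nearest(line, i, ("\\", "${", "}", "`"))
--                 if q is None: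
--                     return (False, True, depth)
--                 if tp == "\\":
--                     if q + 1 >= n:
--                         return (False, True, depth)
--                     i = q + 2
--                 elif tp == "${":
--                     depth += 1
--                     i = q + 2
--                 elif tp == "}":
--                     if depth > 0:
--                         depth -= 1
--                     i = q + 1
--                 else:  # "`"
--                     i = q + 1
--                     if depth == 0:
--                         break
--             continue
--         # pat is "'" or '"': plain string
--         i = p + 1
--         while True:
--             q, tp = _nearest(line, i, ("\\", pat))
--             if q is None:
--                 return (False, False, 0)
--             if tp == "\\":
--                 if q + 1 >= n:
--                     return (False, False, 0)
--                 i = q + 2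
--             else:
--                 i = q + 1
--                 break
-- ===== Notes on version B (the rewrite author's own statement) =====
-- stated objective: faster
-- what changed: Instead of A's per-character state machine (main loop plus a template helper), B repeatedly locates the next relevant delimiter with str.find via a _nearest helper and jumps directly between delimiter positions, never examining ordinary characters in Python at all.
import Mathlib
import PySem

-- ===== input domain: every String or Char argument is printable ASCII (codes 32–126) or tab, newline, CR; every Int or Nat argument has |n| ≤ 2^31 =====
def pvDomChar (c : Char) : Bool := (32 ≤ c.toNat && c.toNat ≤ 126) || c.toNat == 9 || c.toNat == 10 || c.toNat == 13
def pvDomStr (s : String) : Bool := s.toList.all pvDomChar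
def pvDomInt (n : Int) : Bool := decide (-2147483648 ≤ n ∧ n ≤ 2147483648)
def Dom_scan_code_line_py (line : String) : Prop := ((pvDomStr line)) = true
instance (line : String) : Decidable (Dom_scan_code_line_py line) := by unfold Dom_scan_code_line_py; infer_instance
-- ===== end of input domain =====

-- B replaces A's per-character state machine by delimiter jumping: B repeatedly locates the
-- next relevant delimiter with str.find (helper _nearest) and jumps between delimiter
-- positions, so ordinary characters are never examined in Python (constant-factor speedup
-- measured). Return values are proved identical. While loops are ported as recursion on a fuel counter that is always
-- sufficient (indices strictly increase each iteration).

-- ===== SHARED str.find PORT =====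
-- Python line.find(pat, k) for a 1- or 2-char pattern: hand port of str.find with a start
-- argument, exact (none = Python's -1); structural recursion on the dropped suffix.
def pvFindC : List Char → Char → Option Nat
  | [], _ => none
  | a :: rest, c => if a = c then some 0 else (pvFindC rest c).map (· + 1)

def pvFindP : List Char → Char → Char → Option Nat
  | [], _, _ => none
  | a :: rest, c1, c2 =>
    if a = c1 ∧ rest.head? = some c2 then some 0 else (pvFindP rest c1 c2).map (· + 1)

def pvFind1 (cs : List Char) (k : Nat) (c : Char) : Option Nat :=
  (pvFindC (cs.drop k) c).map (k + ·)

def pvFind2 (cs : List Char) (k : Nat) (c1 c2 : Char) : Option Nat :=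
  (pvFindP (cs.drop k) c1 c2).map (k + ·)

-- ===== PORT A =====
-- _scan_template_content(line, start, brace_depth): the while loop as recursion on j.
def pvScanTemplA (cs : List Char) (fuel : Nat) (j : Nat) (depth : Int) : Nat × Bool × Int :=
  match fuel with
  | 0 => (j, false, depth)
  | fuel + 1 =>
    if h : j < cs.length then
      let ch := cs[j]
      if ch = '\\' ∧ j + 1 < cs.length then pvScanTemplA cs fuel (j + 2) depth
      else if ch = '$' ∧ cs[j + 1]? = some '{' then pvScanTemplA cs fuel (j + 2) (depth + 1)
      else if ch = '}' ∧ depth > 0 then pvScanTemplA cs fuel (j + 1) (depth - 1)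
      else if ch = '`' ∧ depth = 0 then (j + 1, true, depth)
      else pvScanTemplA cs fuel (j + 1) depth
    else (j, false, depth)

-- _scan_code_line's while loop: recursion on j with in_str : Option Char.
def pvScanCodeA (cs : List Char) (fuel : Nat) (j : Nat) (inStr : Option Char) : Bool × Bool × Int :=
  match fuel with
  | 0 => (false, false, 0)
  | fuel + 1 =>
    if h : j < cs.length then
      let ch := cs[j]
      if inStr.isSome ∧ ch = '\\' ∧ j + 1 < cs.length then pvScanCodeA cs fuel (j + 2) inStr
      else if inStr.isSome then
        pvScanCodeA cs fuel (j + 1) (if some ch = inStr then none else inStr)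
      else if ch = '/' ∧ cs[j + 1]? = some '/' then (false, false, 0)  -- break → final return
      else if ch = '/' ∧ cs[j + 1]? = some '*' then
        match pvFind2 cs (j + 2) '*' '/' with      -- line.find("*/", j + 2)
        | some close => pvScanCodeA cs fuel (close + 2) inStr
        | none => (true, false, 0)
      else if ch = '`' then
        match pvScanTemplA cs fuel (j + 1) 0 with
        | (endPos, true, _) => pvScanCodeA cs fuel endPos inStr
        | (_, false, depth) => (false, true, depth)
      else if ch = '\'' ∨ ch = '"' then pvScanCodeA cs fuel (j + 1) (some ch)
      else pvScanCodeA cs fuel (j + 1) inStr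
    else (false, false, 0)

def scan_code_line_py (line : String) : Bool × Bool × Int :=
  pvScanCodeA line.toList line.toList.length 0 none

-- ===== PORT B =====
-- _nearest's accumulator update: keep best unless the new find hit strictly earlier.
def pvPick (best : Option (Nat × Nat)) (cand : Option Nat × Nat) : Option (Nat × Nat) :=
  match cand.1 with
  | none => best
  | some p =>
    match best with
    | none => some (p, cand.2)
    | some (b, _) => if p < b then some (p, cand.2) else best

-- _nearest(line, i, pats): the for loop over patterns as a fold (patterns carried as Nat tags).
def pvNearest (cands : List (Option Nat × Nat)) : Option (Nat × Nat) :=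
  cands.foldl pvPick none

-- the inner string while loop: .inl = a final return, .inr k = break with i = k
def pvStrB (cs : List Char) (fuel : Nat) (i : Nat) (qc : Char) : (Bool × Bool × Int) ⊕ Nat :=
  match fuel with
  | 0 => .inl (false, false, 0)
  | fuel + 1 =>
    match pvNearest [(pvFind1 cs i '\\', 0), (pvFind1 cs i qc, 1)] with
    | none => .inl (false, false, 0)
    | some (q, tp) =>
      if tp = 0 then
        if q + 1 ≥ cs.length then .inl (false, false, 0)
        else pvStrB cs fuel (q + 2) qc
      else .inr (q + 1)

-- the inner template while loop (tags: 0 = "\\", 1 = "${", 2 = "}", 3 = "`")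
def pvTemplB (cs : List Char) (fuel : Nat) (i : Nat) (depth : Int) : (Bool × Bool × Int) ⊕ Nat :=
  match fuel with
  | 0 => .inl (false, true, depth)
  | fuel + 1 =>
    match pvNearest [(pvFind1 cs i '\\', 0), (pvFind2 cs i '$' '{', 1),
                     (pvFind1 cs i '}', 2), (pvFind1 cs i '`', 3)] with
    | none => .inl (false, true, depth)
    | some (q, tp) =>
      if tp = 0 then
        if q + 1 ≥ cs.length then .inl (false, true, depth)
        else pvTemplB cs fuel (q + 2) depth
      else if tp = 1 then pvTemplB cs fuel (q + 2) (depth + 1)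
      else if tp = 2 then pvTemplB cs fuel (q + 1) (if depth > 0 then depth - 1 else depth)
      else if depth = 0 then .inr (q + 1) else pvTemplB cs fuel (q + 1) depth

-- the outer while loop (tags: 0 = "//", 1 = "/*", 2 = "`", 3 = "'", 4 = "\"")
def pvCodeB (cs : List Char) (fuel : Nat) (i : Nat) : Bool × Bool × Int :=
  match fuel with
  | 0 => (false, false, 0)
  | fuel + 1 =>
    match pvNearest [(pvFind2 cs i '/' '/', 0), (pvFind2 cs i '/' '*', 1),
                     (pvFind1 cs i '`', 2), (pvFind1 cs i '\'', 3), (pvFind1 cs i '"', 4)] with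
    | none => (false, false, 0)
    | some (p, pat) =>
      if pat = 0 then (false, false, 0)
      else if pat = 1 then
        match pvFind2 cs (p + 2) '*' '/' with
        | none => (true, false, 0)
        | some close => pvCodeB cs fuel (close + 2)
      else if pat = 2 then
        match pvTemplB cs (cs.length + 1) (p + 1) 0 with
        | .inl r => r
        | .inr k => pvCodeB cs fuel k
      else
        match pvStrB cs (cs.length + 1) (p + 1) (if pat = 3 then '\'' else '"') with
        | .inl r => r
        | .inr k => pvCodeB cs fuel k

def scan_code_line_py_alt (line : String) : Bool × Bool × Int :=
  pvCodeB line.toList (line.toList.length + 1) 0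

-- ===== PRECONDITION & SPEC =====
def Spec_scan_code_line_py (line : String) (out : Bool × Bool × Int) : Prop := out = scan_code_line_py_alt line
instance (line : String) (out : Bool × Bool × Int) : Decidable (Spec_scan_code_line_py line out) := by unfold Spec_scan_code_line_py; infer_instance

-- ===== CLAIM (what is proved, stated in full; the proofs are below) =====
def Claim_equal_scan_code_line_py : Prop := ∀ (line : String), Dom_scan_code_line_py line → Spec_scan_code_line_py line (scan_code_line_py line)

-- ===== LEMMAS AND PROOFS =====
lemma find1_step (cs : List Char) (k : Nat) (c : Char) (h : k < cs.length) :
    pvFind1 cs k c = if cs[k] = c then some k else pvFind1 cs (k + 1) c := by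
  unfold pvFind1
  rw [List.drop_eq_getElem_cons h]
  by_cases hc : cs[k] = c
  · simp [pvFindC, hc]
  · simp only [pvFindC, if_neg hc]
    cases hr : pvFindC (cs.drop (k + 1)) c <;> simp [hr] <;> omega

lemma find1_none (cs : List Char) (k : Nat) (c : Char) (h : cs.length ≤ k) :
    pvFind1 cs k c = none := by
  unfold pvFind1
  rw [List.drop_eq_nil_iff.mpr h]
  rfl

lemma find1_ge (cs : List Char) (k : Nat) (c : Char) (j : Nat) (h : pvFind1 cs k c = some j) :
    k ≤ j := by
  unfold pvFind1 at h
  cases hr : pvFindC (cs.drop k) c <;> rw [hr] at h <;> simp at h <;> omega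

lemma find2_step (cs : List Char) (k : Nat) (c1 c2 : Char) (h : k < cs.length) :
    pvFind2 cs k c1 c2 =
      if cs[k] = c1 ∧ cs[k + 1]? = some c2 then some k else pvFind2 cs (k + 1) c1 c2 := by
  unfold pvFind2
  rw [List.drop_eq_getElem_cons h]
  by_cases hc : cs[k] = c1 ∧ cs[k + 1]? = some c2
  · simp [pvFindP, List.head?_drop, hc]
  · rw [if_neg hc]
    simp only [pvFindP, List.head?_drop, if_neg hc]
    cases hr : pvFindP (cs.drop (k + 1)) c1 c2 <;> simp [hr] <;> omega

lemma find2_none (cs : List Char) (k : Nat) (c1 c2 : Char) (h : cs.length ≤ k) :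
    pvFind2 cs k c1 c2 = none := by
  unfold pvFind2
  rw [List.drop_eq_nil_iff.mpr h]
  rfl

lemma find2_ge (cs : List Char) (k : Nat) (c1 c2 : Char) (j : Nat)
    (h : pvFind2 cs k c1 c2 = some j) : k ≤ j := by
  unfold pvFind2 at h
  cases hr : pvFindP (cs.drop k) c1 c2 <;> rw [hr] at h <;> simp at h <;> omega

lemma foldl_pick_post (i t : Nat) :
    ∀ (post : List (Option Nat × Nat)),
      (∀ p t', ((some p : Option Nat), t') ∈ post → i ≤ p) →
      post.foldl pvPick (some (i, t)) = some (i, t) := by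
  intro post
  induction post with
  | nil => intro _; rfl
  | cons hd tl ih =>
    intro h
    obtain ⟨o, t'⟩ := hd
    cases o with
    | none =>
      simp only [List.foldl_cons, pvPick]
      exact ih (fun p t' hm => h p t' (List.mem_cons_of_mem _ hm))
    | some p =>
      have hip : i ≤ p := h p t' (List.mem_cons_self ..)
      simp only [List.foldl_cons, pvPick, if_neg (by omega : ¬ p < i)]
      exact ih (fun p t' hm => h p t' (List.mem_cons_of_mem _ hm))

lemma foldl_pick_lb (i : Nat) :
    ∀ (l : List (Option Nat × Nat)) (b : Option (Nat × Nat)),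
      (∀ p t', ((some p : Option Nat), t') ∈ l → i ≤ p) →
      (∀ q t', b = some (q, t') → i ≤ q) →
      ∀ q t', l.foldl pvPick b = some (q, t') → i ≤ q := by
  intro l
  induction l with
  | nil => intro b _ hb q t' h; exact hb q t' h
  | cons hd tl ih =>
    intro b hl hb q t' h
    obtain ⟨o, t0⟩ := hd
    refine ih (pvPick b (o, t0)) (fun p t' hm => hl p t' (List.mem_cons_of_mem _ hm)) ?_ q t' h
    intro q' t'' hq
    cases o with
    | none => exact hb q' t'' hq
    | some p =>
      have hip : i ≤ p := hl p t0 (List.mem_cons_self ..)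
      simp only [pvPick] at hq
      cases b with
      | none => simp at hq; omega
      | some bb =>
        obtain ⟨bq, bt⟩ := bb
        by_cases hlt : p < bq
        · simp [pvPick, hlt] at hq; omega
        · simp only [pvPick, if_neg hlt] at hq
          have := hb bq bt rfl
          simp at hq
          omega

lemma pvNearest_ge (l : List (Option Nat × Nat)) (i : Nat)
    (h : ∀ p t, ((some p : Option Nat), t) ∈ l → i ≤ p) :
    ∀ q t, pvNearest l = some (q, t) → i ≤ q := by
  intro q t hq
  exact foldl_pick_lb i l none h (by intro _ _ hc; cases hc) q t hq

lemma foldl_pick_sb (i : Nat) :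
    ∀ (l : List (Option Nat × Nat)) (b : Option (Nat × Nat)),
      (∀ p t', ((some p : Option Nat), t') ∈ l → i < p) →
      (∀ q t', b = some (q, t') → i < q) →
      ∀ q t', l.foldl pvPick b = some (q, t') → i < q := by
  intro l
  induction l with
  | nil => intro b _ hb q t' h; exact hb q t' h
  | cons hd tl ih =>
    intro b hl hb q t' h
    obtain ⟨o, t0⟩ := hd
    refine ih (pvPick b (o, t0)) (fun p t' hm => hl p t' (List.mem_cons_of_mem _ hm)) ?_ q t' h
    intro q' t'' hq
    cases o with
    | none => exact hb q' t'' hq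
    | some p =>
      have hip : i < p := hl p t0 (List.mem_cons_self ..)
      simp only [pvPick] at hq
      cases b with
      | none => simp at hq; omega
      | some bb =>
        obtain ⟨bq, bt⟩ := bb
        by_cases hlt : p < bq
        · simp [pvPick, hlt] at hq; omega
        · simp only [pvPick, if_neg hlt] at hq
          have := hb bq bt rfl
          simp at hq
          omega

lemma pvNearest_eq (pre post : List (Option Nat × Nat)) (i t : Nat)
    (hpre : ∀ p t', ((some p : Option Nat), t') ∈ pre → i < p)
    (hpost : ∀ p t', ((some p : Option Nat), t') ∈ post → i ≤ p) :
    pvNearest (pre ++ ((some i : Option Nat), t) :: post) = some (i, t) := by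
  unfold pvNearest
  rw [List.foldl_append, List.foldl_cons]
  have hb : pre.foldl pvPick none = none ∨ ∃ q t', pre.foldl pvPick none = some (q, t') ∧ i < q := by
    cases hf : pre.foldl pvPick none with
    | none => exact Or.inl rfl
    | some qt =>
      obtain ⟨q, t'⟩ := qt
      exact Or.inr ⟨q, t', rfl, foldl_pick_sb i pre none hpre (by intro _ _ hc; cases hc) q t' hf⟩
  have hmid : pvPick (pre.foldl pvPick none) (some i, t) = some (i, t) := by
    rcases hb with hn | ⟨q, t', hs, hq⟩
    · rw [hn]; rfl
    · rw [hs]; simp only [pvPick]; rw [if_pos hq]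
  rw [hmid]
  exact foldl_pick_post i t post hpost

lemma pvScanTemplA_ge (cs : List Char) (f j : Nat) (d : Int) :
    j ≤ (pvScanTemplA cs f j d).1 := by
  induction f generalizing j d with
  | zero => simp [pvScanTemplA]
  | succ f ih =>
    rw [pvScanTemplA]
    by_cases h : j < cs.length
    · rw [dif_pos h]
      simp only
      split_ifs with h1 h2 h3 h4
      · have := ih (j + 2) d; omega
      · have := ih (j + 2) (d + 1); omega
      · have := ih (j + 1) (d - 1); omega
      · simp
      · have := ih (j + 1) d; omega
    · rw [dif_neg h]

lemma templA_fuel (cs : List Char) :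
    ∀ f g j d, cs.length - j ≤ f → cs.length - j ≤ g →
      pvScanTemplA cs f j d = pvScanTemplA cs g j d := by
  intro f
  induction f with
  | zero =>
    intro g j d hf hg
    have hj : ¬ j < cs.length := by omega
    cases g with
    | zero => rfl
    | succ g => rw [pvScanTemplA, pvScanTemplA, dif_neg hj]
  | succ f ih =>
    intro g j d hf hg
    by_cases hj : j < cs.length
    · have hg1 : g ≠ 0 := by omega
      obtain ⟨g, rfl⟩ := Nat.exists_eq_succ_of_ne_zero hg1
      rw [pvScanTemplA, pvScanTemplA, dif_pos hj, dif_pos hj]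
      simp only
      split_ifs with h1 h2 h3 h4
      · exact ih g (j + 2) d (by omega) (by omega)
      · exact ih g (j + 2) (d + 1) (by omega) (by omega)
      · exact ih g (j + 1) (d - 1) (by omega) (by omega)
      · rfl
      · exact ih g (j + 1) d (by omega) (by omega)
    · cases g with
      | zero => rw [pvScanTemplA, pvScanTemplA, dif_neg hj]
      | succ g => rw [pvScanTemplA, pvScanTemplA, dif_neg hj, dif_neg hj]

lemma codeA_fuel (cs : List Char) :
    ∀ f g j s, cs.length - j ≤ f → cs.length - j ≤ g →
      pvScanCodeA cs f j s = pvScanCodeA cs g j s := by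
  intro f
  induction f with
  | zero =>
    intro g j s hf hg
    have hj : ¬ j < cs.length := by omega
    cases g with
    | zero => rfl
    | succ g => rw [pvScanCodeA, pvScanCodeA, dif_neg hj]
  | succ f ih =>
    intro g j s hf hg
    by_cases hj : j < cs.length
    · have hg1 : g ≠ 0 := by omega
      obtain ⟨g, rfl⟩ := Nat.exists_eq_succ_of_ne_zero hg1
      rw [pvScanCodeA, pvScanCodeA, dif_pos hj, dif_pos hj]
      simp only
      split_ifs with h1 h2 h2b h3 h4 h5 h6
      · exact ih g (j + 2) s (by omega) (by omega)
      · exact ih g (j + 1) _ (by omega) (by omega)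
      · exact ih g (j + 1) _ (by omega) (by omega)
      · rfl
      · cases hc : pvFind2 cs (j + 2) '*' '/' with
        | some close =>
          have := find2_ge cs (j + 2) '*' '/' close hc
          exact ih g (close + 2) s (by omega) (by omega)
        | none => rfl
      · rw [templA_fuel cs f g (j + 1) 0 (by omega) (by omega)]
        rcases ht : pvScanTemplA cs g (j + 1) 0 with ⟨e, b, d⟩
        have hge := pvScanTemplA_ge cs g (j + 1) 0
        rw [ht] at hge
        cases b
        · rfl
        · exact ih g e s (by omega) (by omega)
      · exact ih g (j + 1) (some cs[j]) (by omega) (by omega)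
      · exact ih g (j + 1) s (by omega) (by omega)
    · cases g with
      | zero => rw [pvScanCodeA, pvScanCodeA, dif_neg hj]
      | succ g => rw [pvScanCodeA, pvScanCodeA, dif_neg hj, dif_neg hj]

lemma strB_cands_ge (cs : List Char) (i : Nat) (qc : Char) :
    ∀ p t, ((some p : Option Nat), t) ∈
      [(pvFind1 cs i '\\', 0), (pvFind1 cs i qc, 1)] → i ≤ p := by
  intro p t hm
  simp only [List.mem_cons, List.not_mem_nil, or_false, Prod.mk.injEq] at hm
  rcases hm with ⟨h, _⟩ | ⟨h, _⟩ <;> exact find1_ge cs i _ p h.symm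

lemma templB_cands_ge (cs : List Char) (i : Nat) :
    ∀ p t, ((some p : Option Nat), t) ∈
      [(pvFind1 cs i '\\', 0), (pvFind2 cs i '$' '{', 1),
       (pvFind1 cs i '}', 2), (pvFind1 cs i '`', 3)] → i ≤ p := by
  intro p t hm
  simp only [List.mem_cons, List.not_mem_nil, or_false, Prod.mk.injEq] at hm
  rcases hm with ⟨h, _⟩ | ⟨h, _⟩ | ⟨h, _⟩ | ⟨h, _⟩
  · exact find1_ge cs i _ p h.symm
  · exact find2_ge cs i _ _ p h.symm
  · exact find1_ge cs i _ p h.symm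
  · exact find1_ge cs i _ p h.symm

lemma codeB_cands_ge (cs : List Char) (i : Nat) :
    ∀ p t, ((some p : Option Nat), t) ∈
      [(pvFind2 cs i '/' '/', 0), (pvFind2 cs i '/' '*', 1),
       (pvFind1 cs i '`', 2), (pvFind1 cs i '\'', 3), (pvFind1 cs i '"', 4)] → i ≤ p := by
  intro p t hm
  simp only [List.mem_cons, List.not_mem_nil, or_false, Prod.mk.injEq] at hm
  rcases hm with ⟨h, _⟩ | ⟨h, _⟩ | ⟨h, _⟩ | ⟨h, _⟩ | ⟨h, _⟩
  · exact find2_ge cs i _ _ p h.symm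
  · exact find2_ge cs i _ _ p h.symm
  · exact find1_ge cs i _ p h.symm
  · exact find1_ge cs i _ p h.symm
  · exact find1_ge cs i _ p h.symm

lemma strB_nearest_some_lt (cs : List Char) (i : Nat) (qc : Char) (q tp : Nat)
    (hn : pvNearest [(pvFind1 cs i '\\', 0), (pvFind1 cs i qc, 1)] = some (q, tp)) :
    i < cs.length := by
  by_contra hle
  rw [find1_none cs i _ (by omega), find1_none cs i _ (by omega)] at hn
  simp [pvNearest, pvPick] at hn

lemma templB_nearest_some_lt (cs : List Char) (i : Nat) (q tp : Nat)
    (hn : pvNearest [(pvFind1 cs i '\\', 0), (pvFind2 cs i '$' '{', 1),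
                     (pvFind1 cs i '}', 2), (pvFind1 cs i '`', 3)] = some (q, tp)) :
    i < cs.length := by
  by_contra hle
  rw [find1_none cs i _ (by omega), find2_none cs i _ _ (by omega),
      find1_none cs i _ (by omega), find1_none cs i _ (by omega)] at hn
  simp [pvNearest, pvPick] at hn

lemma codeB_nearest_some_lt (cs : List Char) (i : Nat) (q tp : Nat)
    (hn : pvNearest [(pvFind2 cs i '/' '/', 0), (pvFind2 cs i '/' '*', 1),
                     (pvFind1 cs i '`', 2), (pvFind1 cs i '\'', 3), (pvFind1 cs i '"', 4)] = some (q, tp)) :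
    i < cs.length := by
  by_contra hle
  rw [find2_none cs i _ _ (by omega), find2_none cs i _ _ (by omega), find1_none cs i _ (by omega),
      find1_none cs i _ (by omega), find1_none cs i _ (by omega)] at hn
  simp [pvNearest, pvPick] at hn

lemma strB_inr_gt (cs : List Char) :
    ∀ f i qc k, pvStrB cs f i qc = .inr k → i < k := by
  intro f
  induction f with
  | zero => intro i qc k h; simp [pvStrB] at h
  | succ f ih =>
    intro i qc k h
    rw [pvStrB] at h
    cases hn : pvNearest [(pvFind1 cs i '\\', 0), (pvFind1 cs i qc, 1)] with
    | none => rw [hn] at h; simp at h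
    | some qt =>
      obtain ⟨q, tp⟩ := qt
      have hq : i ≤ q := pvNearest_ge _ i (strB_cands_ge cs i qc) q tp hn
      rw [hn] at h
      simp only at h
      split_ifs at h with h1 h2
      · have := ih (q + 2) qc k h; omega
      · simp at h; omega

lemma templB_inr_gt (cs : List Char) :
    ∀ f i d k, pvTemplB cs f i d = .inr k → i < k := by
  intro f
  induction f with
  | zero => intro i d k h; simp [pvTemplB] at h
  | succ f ih =>
    intro i d k h
    rw [pvTemplB] at h
    cases hn : pvNearest [(pvFind1 cs i '\\', 0), (pvFind2 cs i '$' '{', 1),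
                          (pvFind1 cs i '}', 2), (pvFind1 cs i '`', 3)] with
    | none => rw [hn] at h; simp at h
    | some qt =>
      obtain ⟨q, tp⟩ := qt
      have hq : i ≤ q := pvNearest_ge _ i (templB_cands_ge cs i) q tp hn
      rw [hn] at h
      simp only at h
      split_ifs at h with h1 h2 h3 h4 h5
      · have := ih (q + 2) d k h; omega
      · have := ih (q + 2) (d + 1) k h; omega
      · have := ih (q + 1) _ k h; omega
      · have := ih (q + 1) _ k h; omega
      · simp at h; omega
      · have := ih (q + 1) d k h; omega

lemma strB_fuel (cs : List Char) :
    ∀ f g i qc, cs.length - i < f → cs.length - i < g →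
      pvStrB cs f i qc = pvStrB cs g i qc := by
  intro f
  induction f with
  | zero => intro g i qc hf hg; omega
  | succ f ih =>
    intro g i qc hf hg
    have hg1 : g ≠ 0 := by omega
    obtain ⟨g, rfl⟩ := Nat.exists_eq_succ_of_ne_zero hg1
    rw [pvStrB, pvStrB]
    cases hn : pvNearest [(pvFind1 cs i '\\', 0), (pvFind1 cs i qc, 1)] with
    | none => rfl
    | some qt =>
      obtain ⟨q, tp⟩ := qt
      have hq : i ≤ q := pvNearest_ge _ i (strB_cands_ge cs i qc) q tp hn
      have hilen : i < cs.length := strB_nearest_some_lt cs i qc q tp hn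
      simp only
      split_ifs with h1 h2
      · rfl
      · exact ih g (q + 2) qc (by omega) (by omega)
      · rfl

lemma templB_fuel (cs : List Char) :
    ∀ f g i d, cs.length - i < f → cs.length - i < g →
      pvTemplB cs f i d = pvTemplB cs g i d := by
  intro f
  induction f with
  | zero => intro g i d hf hg; omega
  | succ f ih =>
    intro g i d hf hg
    have hg1 : g ≠ 0 := by omega
    obtain ⟨g, rfl⟩ := Nat.exists_eq_succ_of_ne_zero hg1
    rw [pvTemplB, pvTemplB]
    cases hn : pvNearest [(pvFind1 cs i '\\', 0), (pvFind2 cs i '$' '{', 1),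
                          (pvFind1 cs i '}', 2), (pvFind1 cs i '`', 3)] with
    | none => rfl
    | some qt =>
      obtain ⟨q, tp⟩ := qt
      have hq : i ≤ q := pvNearest_ge _ i (templB_cands_ge cs i) q tp hn
      have hilen : i < cs.length := templB_nearest_some_lt cs i q tp hn
      simp only
      split_ifs with h1 h2 h3 h4 h5 h6
      all_goals first
        | rfl
        | exact ih g _ _ (by omega) (by omega)

lemma codeB_fuel (cs : List Char) :
    ∀ f g i, cs.length - i < f → cs.length - i < g →
      pvCodeB cs f i = pvCodeB cs g i := by
  intro f
  induction f with
  | zero => intro g i hf hg; omega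
  | succ f ih =>
    intro g i hf hg
    have hg1 : g ≠ 0 := by omega
    obtain ⟨g, rfl⟩ := Nat.exists_eq_succ_of_ne_zero hg1
    rw [pvCodeB, pvCodeB]
    cases hn : pvNearest [(pvFind2 cs i '/' '/', 0), (pvFind2 cs i '/' '*', 1),
                          (pvFind1 cs i '`', 2), (pvFind1 cs i '\'', 3), (pvFind1 cs i '"', 4)] with
    | none => rfl
    | some qt =>
      obtain ⟨p, pat⟩ := qt
      have hp : i ≤ p := pvNearest_ge _ i (codeB_cands_ge cs i) p pat hn
      have hilen : i < cs.length := codeB_nearest_some_lt cs i p pat hn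
      simp only
      split_ifs with h1 h2 h3 h4
      · rfl
      · cases hc : pvFind2 cs (p + 2) '*' '/' with
        | none => rfl
        | some close =>
          have := find2_ge cs (p + 2) '*' '/' close hc
          exact ih g (close + 2) (by omega) (by omega)
      · cases ht : pvTemplB cs (cs.length + 1) (p + 1) 0 with
        | inl r => rfl
        | inr k =>
          have := templB_inr_gt cs (cs.length + 1) (p + 1) 0 k ht
          exact ih g k (by omega) (by omega)
      · cases hs : pvStrB cs (cs.length + 1) (p + 1) '\'' with
        | inl r => rfl
        | inr k =>
          have := strB_inr_gt cs (cs.length + 1) (p + 1) _ k hs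
          exact ih g k (by omega) (by omega)
      · cases hs : pvStrB cs (cs.length + 1) (p + 1) '"' with
        | inl r => rfl
        | inr k =>
          have := strB_inr_gt cs (cs.length + 1) (p + 1) _ k hs
          exact ih g k (by omega) (by omega)

-- A's in-string stepping equals B's find-jumping string scan (plus the resumed code loop).
lemma str_eq (cs : List Char) :
    ∀ fa i q, q ≠ '\\' → cs.length - i ≤ fa →
      pvScanCodeA cs fa i (some q) =
        (match pvStrB cs (cs.length + 1) i q with
         | .inl r => r
         | .inr k => pvScanCodeA cs cs.length k none) := by
  intro fa
  induction fa with
  | zero =>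
    intro i q hq hf
    rw [pvScanCodeA, pvStrB, find1_none cs i _ (by omega), find1_none cs i _ (by omega)]
    rfl
  | succ fa ih =>
    intro i q hq hf
    by_cases hi : i < cs.length
    · rw [pvScanCodeA, dif_pos hi]
      simp only [Option.isSome_some, true_and, Option.some.injEq, eq_self_iff_true, if_true]
      by_cases hbs : cs[i] = '\\'
      · by_cases h2 : i + 1 < cs.length
        · -- escape consumed
          rw [if_pos ⟨hbs, h2⟩]
          have hn : pvNearest [(pvFind1 cs i '\\', 0), (pvFind1 cs i q, 1)] = some (i, 0) := by
            rw [find1_step cs i '\\' hi, if_pos hbs, find1_step cs i q hi,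
                if_neg (by rw [hbs]; exact fun hc => hq hc.symm)]
            exact pvNearest_eq [] [(pvFind1 cs (i + 1) q, 1)] i 0
              (by intro p t' hm; cases hm)
              (by intro p t' hm
                  simp only [List.mem_cons, List.not_mem_nil, or_false, Prod.mk.injEq] at hm
                  have := find1_ge cs (i + 1) q p hm.1.symm; omega)
          conv_rhs => rw [pvStrB]
          rw [hn]
          simp only [if_pos rfl, if_neg (by omega : ¬ i + 1 ≥ cs.length)]
          rw [strB_fuel cs cs.length (cs.length + 1) (i + 2) q (by omega) (by omega)]
          exact ih (i + 2) q hq (by omega)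
        · -- lone backslash at end of line
          rw [if_neg (by tauto), if_neg (by rw [hbs]; exact fun hc => hq hc.symm)]
          have hend : cs.length = i + 1 := by omega
          rw [ih (i + 1) q hq (by omega)]
          have hnone : pvStrB cs (cs.length + 1) (i + 1) q = .inl (false, false, 0) := by
            rw [pvStrB, find1_none cs (i + 1) _ (by omega), find1_none cs (i + 1) _ (by omega)]
            rfl
          rw [hnone]
          have hn : pvNearest [(pvFind1 cs i '\\', 0), (pvFind1 cs i q, 1)] = some (i, 0) := by
            rw [find1_step cs i '\\' hi, if_pos hbs, find1_step cs i q hi,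
                if_neg (by rw [hbs]; exact fun hc => hq hc.symm)]
            exact pvNearest_eq [] [(pvFind1 cs (i + 1) q, 1)] i 0
              (by intro p t' hm; cases hm)
              (by intro p t' hm
                  simp only [List.mem_cons, List.not_mem_nil, or_false, Prod.mk.injEq] at hm
                  have := find1_ge cs (i + 1) q p hm.1.symm; omega)
          conv_rhs => rw [pvStrB]
          rw [hn]
          simp [show cs.length ≤ i + 1 by omega]
      · by_cases hqc : cs[i] = q
        · -- closing quote
          rw [if_neg (by tauto), if_pos hqc]
          have hn : pvNearest [(pvFind1 cs i '\\', 0), (pvFind1 cs i q, 1)] = some (i, 1) := by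
            rw [find1_step cs i '\\' hi, if_neg hbs, find1_step cs i q hi, if_pos hqc]
            exact pvNearest_eq [(pvFind1 cs (i + 1) '\\', 0)] [] i 1
              (by intro p t' hm
                  simp only [List.mem_cons, List.not_mem_nil, or_false, Prod.mk.injEq] at hm
                  have := find1_ge cs (i + 1) '\\' p hm.1.symm; omega)
              (by intro p t' hm; cases hm)
          conv_rhs => rw [pvStrB]
          rw [hn]
          simp only [if_neg (by omega : ¬ (1 : Nat) = 0)]
          exact codeA_fuel cs fa cs.length (i + 1) none (by omega) (by omega)
        · -- ordinary character: both scans shift one position right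
          rw [if_neg (by tauto), if_neg hqc]
          have hshift : pvStrB cs (cs.length + 1) i q = pvStrB cs (cs.length + 1) (i + 1) q := by
            conv_lhs => rw [pvStrB]
            conv_rhs => rw [pvStrB]
            rw [find1_step cs i '\\' hi, if_neg hbs, find1_step cs i q hi, if_neg hqc]
          rw [hshift]
          exact ih (i + 1) q hq (by omega)
    · rw [pvScanCodeA, dif_neg hi]
      rw [pvStrB, find1_none cs i _ (by omega), find1_none cs i _ (by omega)]
      rfl

-- A's template helper stepping equals B's find-jumping template scan.
lemma templ_eq (cs : List Char) :
    ∀ fa i d, cs.length - i ≤ fa →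
      (match pvScanTemplA cs fa i d with
       | (e, true, _) => (Sum.inr e : (Bool × Bool × Int) ⊕ Nat)
       | (_, false, d') => .inl (false, true, d'))
      = pvTemplB cs (cs.length + 1) i d := by
  intro fa
  induction fa with
  | zero =>
    intro i d hf
    rw [pvScanTemplA, pvTemplB, find1_none cs i _ (by omega), find2_none cs i _ _ (by omega),
        find1_none cs i _ (by omega), find1_none cs i _ (by omega)]
    rfl
  | succ fa ih =>
    intro i d hf
    by_cases hi : i < cs.length
    · rw [pvScanTemplA, dif_pos hi]
      simp only
      by_cases hbs : cs[i] = '\\'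
      · have hpre : ∀ p t', ((some p : Option Nat), t') ∈ ([] : List (Option Nat × Nat)) → i < p := by
          intro p t' hm; cases hm
        have hpost : ∀ p t', ((some p : Option Nat), t') ∈
            [(pvFind2 cs i '$' '{', 1), (pvFind1 cs i '}', 2), (pvFind1 cs i '`', 3)] → i ≤ p := by
          intro p t' hm
          simp only [List.mem_cons, List.not_mem_nil, or_false, Prod.mk.injEq] at hm
          rcases hm with ⟨h, _⟩ | ⟨h, _⟩ | ⟨h, _⟩
          · exact find2_ge cs i _ _ p h.symm
          · exact find1_ge cs i _ p h.symm
          · exact find1_ge cs i _ p h.symm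
        have hn : pvNearest [(pvFind1 cs i '\\', 0), (pvFind2 cs i '$' '{', 1),
                             (pvFind1 cs i '}', 2), (pvFind1 cs i '`', 3)] = some (i, 0) := by
          rw [find1_step cs i '\\' hi, if_pos hbs]
          exact pvNearest_eq [] _ i 0 hpre hpost
        by_cases h2 : i + 1 < cs.length
        · rw [if_pos ⟨hbs, h2⟩]
          conv_rhs => rw [pvTemplB]
          rw [hn]
          simp only [if_pos rfl, if_neg (by omega : ¬ i + 1 ≥ cs.length)]
          rw [templB_fuel cs cs.length (cs.length + 1) (i + 2) d (by omega) (by omega)]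
          exact ih (i + 2) d (by omega)
        · rw [if_neg (by tauto), if_neg (by rw [hbs]; exact fun hc => by cases hc.1),
              if_neg (by rw [hbs]; exact fun hc => by cases hc.1),
              if_neg (by rw [hbs]; exact fun hc => by cases hc.1)]
          have hA : pvScanTemplA cs fa (i + 1) d = (i + 1, false, d) := by
            cases fa with
            | zero => rfl
            | succ fa => rw [pvScanTemplA, dif_neg (by omega : ¬ i + 1 < cs.length)]
          rw [hA]
          conv_rhs => rw [pvTemplB]
          rw [hn]
          simp [show cs.length ≤ i + 1 by omega]
      · by_cases hdl : cs[i] = '$' ∧ cs[i + 1]? = some '{'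
        · rw [if_neg (by tauto), if_pos hdl]
          have hn : pvNearest [(pvFind1 cs i '\\', 0), (pvFind2 cs i '$' '{', 1),
                               (pvFind1 cs i '}', 2), (pvFind1 cs i '`', 3)] = some (i, 1) := by
            rw [find1_step cs i '\\' hi, if_neg hbs, find2_step cs i '$' '{' hi, if_pos hdl]
            refine pvNearest_eq [(pvFind1 cs (i + 1) '\\', 0)] _ i 1 ?_ ?_
            · intro p t' hm
              simp only [List.mem_cons, List.not_mem_nil, or_false, Prod.mk.injEq] at hm
              have := find1_ge cs (i + 1) '\\' p hm.1.symm; omega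
            · intro p t' hm
              simp only [List.mem_cons, List.not_mem_nil, or_false, Prod.mk.injEq] at hm
              rcases hm with ⟨h, _⟩ | ⟨h, _⟩ <;> exact find1_ge cs i _ p h.symm
          conv_rhs => rw [pvTemplB]
          rw [hn]
          simp only [if_neg (by omega : ¬ (1 : Nat) = 0), if_pos rfl]
          rw [templB_fuel cs cs.length (cs.length + 1) (i + 2) (d + 1) (by omega) (by omega)]
          exact ih (i + 2) (d + 1) (by omega)
        · by_cases hbr : cs[i] = '}'
          · have hn : pvNearest [(pvFind1 cs i '\\', 0), (pvFind2 cs i '$' '{', 1),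
                                 (pvFind1 cs i '}', 2), (pvFind1 cs i '`', 3)] = some (i, 2) := by
              rw [find1_step cs i '\\' hi, if_neg hbs, find2_step cs i '$' '{' hi, if_neg hdl,
                  find1_step cs i '}' hi, if_pos hbr]
              refine pvNearest_eq [(pvFind1 cs (i + 1) '\\', 0), (pvFind2 cs (i + 1) '$' '{', 1)] _ i 2 ?_ ?_
              · intro p t' hm
                simp only [List.mem_cons, List.not_mem_nil, or_false, Prod.mk.injEq] at hm
                rcases hm with ⟨h, _⟩ | ⟨h, _⟩
                · have := find1_ge cs (i + 1) '\\' p h.symm; omega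
                · have := find2_ge cs (i + 1) '$' '{' p h.symm; omega
              · intro p t' hm
                simp only [List.mem_cons, List.not_mem_nil, or_false, Prod.mk.injEq] at hm
                exact find1_ge cs i _ p hm.1.symm
            rw [if_neg (by tauto), if_neg hdl]
            conv_rhs => rw [pvTemplB]
            rw [hn]
            simp only [if_neg (by omega : ¬ (2 : Nat) = 0), if_neg (by omega : ¬ (2 : Nat) = 1),
                       eq_self_iff_true, if_true]
            by_cases hd : d > 0
            · rw [if_pos ⟨hbr, hd⟩, if_pos hd]
              rw [templB_fuel cs cs.length (cs.length + 1) (i + 1) (d - 1) (by omega) (by omega)]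
              exact ih (i + 1) (d - 1) (by omega)
            · rw [if_neg (by tauto), if_neg (by rw [hbr]; exact fun hc => by cases hc.1), if_neg hd]
              rw [templB_fuel cs cs.length (cs.length + 1) (i + 1) d (by omega) (by omega)]
              exact ih (i + 1) d (by omega)
          · by_cases hbt : cs[i] = '`'
            · have hn : pvNearest [(pvFind1 cs i '\\', 0), (pvFind2 cs i '$' '{', 1),
                                   (pvFind1 cs i '}', 2), (pvFind1 cs i '`', 3)] = some (i, 3) := by
                rw [find1_step cs i '\\' hi, if_neg hbs, find2_step cs i '$' '{' hi, if_neg hdl,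
                    find1_step cs i '}' hi, if_neg hbr, find1_step cs i '`' hi, if_pos hbt]
                refine pvNearest_eq [(pvFind1 cs (i + 1) '\\', 0), (pvFind2 cs (i + 1) '$' '{', 1),
                                     (pvFind1 cs (i + 1) '}', 2)] [] i 3 ?_ ?_
                · intro p t' hm
                  simp only [List.mem_cons, List.not_mem_nil, or_false, Prod.mk.injEq] at hm
                  rcases hm with ⟨h, _⟩ | ⟨h, _⟩ | ⟨h, _⟩
                  · have := find1_ge cs (i + 1) '\\' p h.symm; omega
                  · have := find2_ge cs (i + 1) '$' '{' p h.symm; omega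
                  · have := find1_ge cs (i + 1) '}' p h.symm; omega
                · intro p t' hm; cases hm
              rw [if_neg (by tauto), if_neg hdl, if_neg (by tauto : ¬ (cs[i] = '}' ∧ d > 0))]
              conv_rhs => rw [pvTemplB]
              rw [hn]
              simp only [if_neg (by omega : ¬ (3 : Nat) = 0), if_neg (by omega : ¬ (3 : Nat) = 1),
                         if_neg (by omega : ¬ (3 : Nat) = 2)]
              by_cases hd : d = 0
              · rw [if_pos ⟨hbt, hd⟩, if_pos hd]
              · rw [if_neg (by tauto), if_neg hd]
                rw [templB_fuel cs cs.length (cs.length + 1) (i + 1) d (by omega) (by omega)]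
                exact ih (i + 1) d (by omega)
            · -- ordinary character: both scans shift one position right
              rw [if_neg (by tauto), if_neg hdl, if_neg (by tauto), if_neg (by tauto)]
              have hshift : pvTemplB cs (cs.length + 1) i d = pvTemplB cs (cs.length + 1) (i + 1) d := by
                conv_lhs => rw [pvTemplB]
                conv_rhs => rw [pvTemplB]
                rw [find1_step cs i '\\' hi, if_neg hbs, find2_step cs i '$' '{' hi, if_neg hdl,
                    find1_step cs i '}' hi, if_neg hbr, find1_step cs i '`' hi, if_neg hbt]
              rw [hshift]
              exact ih (i + 1) d (by omega)
    · rw [pvScanTemplA, dif_neg hi]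
      rw [pvTemplB, find1_none cs i _ (by omega), find2_none cs i _ _ (by omega),
          find1_none cs i _ (by omega), find1_none cs i _ (by omega)]
      rfl

-- Main simulation: A's code loop equals B's delimiter-jumping code loop.
lemma main_eq (cs : List Char) :
    ∀ fa i, cs.length - i ≤ fa →
      pvScanCodeA cs fa i none = pvCodeB cs (cs.length + 1) i := by
  intro fa
  induction fa with
  | zero =>
    intro i hf
    rw [pvScanCodeA, pvCodeB, find2_none cs i _ _ (by omega), find2_none cs i _ _ (by omega),
        find1_none cs i _ (by omega), find1_none cs i _ (by omega), find1_none cs i _ (by omega)]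
    rfl
  | succ fa ih =>
    intro i hf
    by_cases hi : i < cs.length
    · rw [pvScanCodeA, dif_pos hi]
      simp only [Option.isSome_none, Bool.false_eq_true, false_and, if_false]
      by_cases hss : cs[i] = '/' ∧ cs[i + 1]? = some '/'
      · rw [if_pos hss]
        have hn : pvNearest [(pvFind2 cs i '/' '/', 0), (pvFind2 cs i '/' '*', 1),
                             (pvFind1 cs i '`', 2), (pvFind1 cs i '\'', 3), (pvFind1 cs i '"', 4)]
            = some (i, 0) := by
          rw [find2_step cs i '/' '/' hi, if_pos hss]
          refine pvNearest_eq [] _ i 0 (by intro p t' hm; cases hm) ?_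
          intro p t' hm
          simp only [List.mem_cons, List.not_mem_nil, or_false, Prod.mk.injEq] at hm
          rcases hm with ⟨h, _⟩ | ⟨h, _⟩ | ⟨h, _⟩ | ⟨h, _⟩
          · exact find2_ge cs i _ _ p h.symm
          · exact find1_ge cs i _ p h.symm
          · exact find1_ge cs i _ p h.symm
          · exact find1_ge cs i _ p h.symm
        conv_rhs => rw [pvCodeB]
        rw [hn]
        simp
      · by_cases hsc : cs[i] = '/' ∧ cs[i + 1]? = some '*'
        · rw [if_neg hss, if_pos hsc]
          have hn : pvNearest [(pvFind2 cs i '/' '/', 0), (pvFind2 cs i '/' '*', 1),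
                               (pvFind1 cs i '`', 2), (pvFind1 cs i '\'', 3), (pvFind1 cs i '"', 4)]
              = some (i, 1) := by
            rw [find2_step cs i '/' '/' hi, if_neg hss, find2_step cs i '/' '*' hi, if_pos hsc]
            refine pvNearest_eq [(pvFind2 cs (i + 1) '/' '/', 0)] _ i 1 ?_ ?_
            · intro p t' hm
              simp only [List.mem_cons, List.not_mem_nil, or_false, Prod.mk.injEq] at hm
              have := find2_ge cs (i + 1) '/' '/' p hm.1.symm; omega
            · intro p t' hm
              simp only [List.mem_cons, List.not_mem_nil, or_false, Prod.mk.injEq] at hm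
              rcases hm with ⟨h, _⟩ | ⟨h, _⟩ | ⟨h, _⟩ <;> exact find1_ge cs i _ p h.symm
          conv_rhs => rw [pvCodeB]
          rw [hn]
          simp only [if_neg (by omega : ¬ (1 : Nat) = 0), eq_self_iff_true, if_true]
          cases hc : pvFind2 cs (i + 2) '*' '/' with
          | none => rfl
          | some close =>
            have hcge := find2_ge cs (i + 2) '*' '/' close hc
            show pvScanCodeA cs fa (close + 2) none = pvCodeB cs cs.length (close + 2)
            rw [ih (close + 2) (by omega)]
            exact codeB_fuel cs (cs.length + 1) cs.length (close + 2) (by omega) (by omega)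
        · by_cases hbt : cs[i] = '`'
          · rw [if_neg hss, if_neg hsc, if_pos hbt]
            have hn : pvNearest [(pvFind2 cs i '/' '/', 0), (pvFind2 cs i '/' '*', 1),
                                 (pvFind1 cs i '`', 2), (pvFind1 cs i '\'', 3), (pvFind1 cs i '"', 4)]
                = some (i, 2) := by
              rw [find2_step cs i '/' '/' hi, if_neg hss, find2_step cs i '/' '*' hi, if_neg hsc,
                  find1_step cs i '`' hi, if_pos hbt]
              refine pvNearest_eq [(pvFind2 cs (i + 1) '/' '/', 0), (pvFind2 cs (i + 1) '/' '*', 1)]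
                _ i 2 ?_ ?_
              · intro p t' hm
                simp only [List.mem_cons, List.not_mem_nil, or_false, Prod.mk.injEq] at hm
                rcases hm with ⟨h, _⟩ | ⟨h, _⟩
                · have := find2_ge cs (i + 1) '/' '/' p h.symm; omega
                · have := find2_ge cs (i + 1) '/' '*' p h.symm; omega
              · intro p t' hm
                simp only [List.mem_cons, List.not_mem_nil, or_false, Prod.mk.injEq] at hm
                rcases hm with ⟨h, _⟩ | ⟨h, _⟩ <;> exact find1_ge cs i _ p h.symm
            conv_rhs => rw [pvCodeB]
            rw [hn]
            simp only [if_neg (by omega : ¬ (2 : Nat) = 0), if_neg (by omega : ¬ (2 : Nat) = 1),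
                       eq_self_iff_true, if_true]
            rw [← templ_eq cs fa (i + 1) 0 (by omega)]
            rcases ht : pvScanTemplA cs fa (i + 1) 0 with ⟨e, b, dep⟩
            have hge := pvScanTemplA_ge cs fa (i + 1) 0
            rw [ht] at hge
            cases b
            · rfl
            · simp only
              rw [ih e (by omega)]
              exact codeB_fuel cs (cs.length + 1) cs.length e (by omega) (by omega)
          · by_cases hq : cs[i] = '\'' ∨ cs[i] = '"'
            · rw [if_neg hss, if_neg hsc, if_neg hbt, if_pos hq]
              have hstr := str_eq cs fa (i + 1) cs[i] (by rcases hq with h | h <;> rw [h] <;> decide)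
                (by omega)
              rw [hstr]
              have hpre00 : ∀ p t', ((some p : Option Nat), t') ∈
                  [(pvFind2 cs (i + 1) '/' '/', 0), (pvFind2 cs (i + 1) '/' '*', 1)] → i < p := by
                intro p t' hm
                simp only [List.mem_cons, List.not_mem_nil, or_false, Prod.mk.injEq] at hm
                rcases hm with ⟨h, _⟩ | ⟨h, _⟩
                · have := find2_ge cs (i + 1) '/' '/' p h.symm; omega
                · have := find2_ge cs (i + 1) '/' '*' p h.symm; omega
              rcases hq with hsq | hdq
              · have hn : pvNearest [(pvFind2 cs i '/' '/', 0), (pvFind2 cs i '/' '*', 1),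
                                     (pvFind1 cs i '`', 2), (pvFind1 cs i '\'', 3), (pvFind1 cs i '"', 4)]
                    = some (i, 3) := by
                  rw [find2_step cs i '/' '/' hi, if_neg hss, find2_step cs i '/' '*' hi, if_neg hsc,
                      find1_step cs i '`' hi, if_neg hbt, find1_step cs i '\'' hi, if_pos hsq]
                  refine pvNearest_eq [(pvFind2 cs (i + 1) '/' '/', 0), (pvFind2 cs (i + 1) '/' '*', 1),
                                       (pvFind1 cs (i + 1) '`', 2)] _ i 3 ?_ ?_
                  · intro p t' hm
                    simp only [List.mem_cons, List.not_mem_nil, or_false, Prod.mk.injEq] at hm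
                    rcases hm with ⟨h, _⟩ | ⟨h, _⟩ | ⟨h, _⟩
                    · have := find2_ge cs (i + 1) '/' '/' p h.symm; omega
                    · have := find2_ge cs (i + 1) '/' '*' p h.symm; omega
                    · have := find1_ge cs (i + 1) '`' p h.symm; omega
                  · intro p t' hm
                    simp only [List.mem_cons, List.not_mem_nil, or_false, Prod.mk.injEq] at hm
                    exact find1_ge cs i _ p hm.1.symm
                conv_rhs => rw [pvCodeB]
                rw [hn]
                simp only [if_neg (by omega : ¬ (3 : Nat) = 0), if_neg (by omega : ¬ (3 : Nat) = 1),
                           if_neg (by omega : ¬ (3 : Nat) = 2), eq_self_iff_true, if_true]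
                rw [hsq]
                cases hs : pvStrB cs (cs.length + 1) (i + 1) '\'' with
                | inl r => rfl
                | inr k =>
                  have hk := strB_inr_gt cs (cs.length + 1) (i + 1) '\'' k hs
                  simp only
                  rw [codeA_fuel cs cs.length fa k none (by omega) (by omega), ih k (by omega)]
                  exact codeB_fuel cs (cs.length + 1) cs.length k (by omega) (by omega)
              · have hn : pvNearest [(pvFind2 cs i '/' '/', 0), (pvFind2 cs i '/' '*', 1),
                                     (pvFind1 cs i '`', 2), (pvFind1 cs i '\'', 3), (pvFind1 cs i '"', 4)]
                    = some (i, 4) := by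
                  rw [find2_step cs i '/' '/' hi, if_neg hss, find2_step cs i '/' '*' hi, if_neg hsc,
                      find1_step cs i '`' hi, if_neg hbt, find1_step cs i '\'' hi,
                      if_neg (by rw [hdq]; decide), find1_step cs i '"' hi, if_pos hdq]
                  refine pvNearest_eq [(pvFind2 cs (i + 1) '/' '/', 0), (pvFind2 cs (i + 1) '/' '*', 1),
                                       (pvFind1 cs (i + 1) '`', 2), (pvFind1 cs (i + 1) '\'', 3)] [] i 4 ?_
                    (by intro p t' hm; cases hm)
                  intro p t' hm
                  simp only [List.mem_cons, List.not_mem_nil, or_false, Prod.mk.injEq] at hm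
                  rcases hm with ⟨h, _⟩ | ⟨h, _⟩ | ⟨h, _⟩ | ⟨h, _⟩
                  · have := find2_ge cs (i + 1) '/' '/' p h.symm; omega
                  · have := find2_ge cs (i + 1) '/' '*' p h.symm; omega
                  · have := find1_ge cs (i + 1) '`' p h.symm; omega
                  · have := find1_ge cs (i + 1) '\'' p h.symm; omega
                conv_rhs => rw [pvCodeB]
                rw [hn]
                simp only [if_neg (by omega : ¬ (4 : Nat) = 0), if_neg (by omega : ¬ (4 : Nat) = 1),
                           if_neg (by omega : ¬ (4 : Nat) = 2), if_neg (by omega : ¬ (4 : Nat) = 3)]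
                rw [hdq]
                cases hs : pvStrB cs (cs.length + 1) (i + 1) '"' with
                | inl r => rfl
                | inr k =>
                  have hk := strB_inr_gt cs (cs.length + 1) (i + 1) '"' k hs
                  simp only
                  rw [codeA_fuel cs cs.length fa k none (by omega) (by omega), ih k (by omega)]
                  exact codeB_fuel cs (cs.length + 1) cs.length k (by omega) (by omega)
            · -- ordinary character: both scans shift one position right
              rw [if_neg hss, if_neg hsc, if_neg hbt, if_neg hq]
              have hshift : pvCodeB cs (cs.length + 1) i = pvCodeB cs (cs.length + 1) (i + 1) := by
                conv_lhs => rw [pvCodeB]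
                conv_rhs => rw [pvCodeB]
                rw [find2_step cs i '/' '/' hi, if_neg hss, find2_step cs i '/' '*' hi, if_neg hsc,
                    find1_step cs i '`' hi, if_neg hbt,
                    find1_step cs i '\'' hi, if_neg (fun hc => hq (Or.inl hc)),
                    find1_step cs i '"' hi, if_neg (fun hc => hq (Or.inr hc))]
              rw [hshift]
              exact ih (i + 1) (by omega)
    · rw [pvScanCodeA, dif_neg hi]
      rw [pvCodeB, find2_none cs i _ _ (by omega), find2_none cs i _ _ (by omega),
          find1_none cs i _ (by omega), find1_none cs i _ (by omega), find1_none cs i _ (by omega)]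
      rfl

-- ===== VERDICT (by name: the statement is the Claim_ definition above) =====
theorem scan_code_line_py_spec : Claim_equal_scan_code_line_py := by
  intro line _
  unfold Spec_scan_code_line_py scan_code_line_py scan_code_line_py_alt
  exact main_eq line.toList line.toList.length 0 (by omega)
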